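-- pv_equiv track=rewrite | github.com/bgrube/ReactionEfficiency | cleanBruFitLogFile.py | filterLinesInFile
-- ===== SOURCE A (Python) =====
-- def filterLinesInFile(
--   file,
--   markers,
--   removeTrailingEmptyLines = True
-- ):
--   """
--   generator that returns all lines from the given file handle, except
--   those text blocks that start with markers given by the keys of the
--   `markers` dict; the dict values give the block length in number of
--   lines (including the marker line)
--   """
--   # see https://codereview.stackexchange.com/a/109806
--   lines = iter(file)
--   try:
--     foundMarker = False
--     while True:
--       line = next(lines)
--       # discard any empty lines trailing the previously found marker
--       while foundMarker and removeTrailingEmptyLines and line == "\n":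
--         line = next(lines)
--       foundMarker = False
--       for marker, nmbLines in markers.items():
--         if marker in line:
--           foundMarker = True
--           # discard nmbLines lines including the one with startMarker
--           for _ in range(nmbLines - 1):
--             next(lines)
--           # if removeTrailingEmptyLines:
--           #   while True:
--           #     line = next(lines)
--           #     if line != "\n":
--           #       yield line
--           #       break
--           break
--       if not foundMarker:
--         yield line
--   except StopIteration:
--     return
-- ===== SOURCE B (Python) =====
-- def filterLinesInFile(
--   file,
--   markers,
--   removeTrailingEmptyLines = True
-- ):
--   """
--   generator yielding the lines of `file` except marker-started blocks;
--   single loop with a skip counter and an after-marker flag instead of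
--   manual next()/StopIteration draining
--   """
--   skip = 0
--   afterMarker = False
--   for line in file:
--     if skip > 0:
--       skip -= 1
--       continue
--     if afterMarker and removeTrailingEmptyLines and line == "\n":
--       continue
--     nmbLines = next((n for m, n in markers.items() if m in line), None)
--     if nmbLines is None:
--       afterMarker = False
--       yield line
--     else:
--       skip = nmbLines - 1
--       afterMarker = True
-- ===== Notes on version B (the rewrite author's own statement) =====
-- stated objective: idiomatic
-- what changed: Replaces A's manual iter()/next() draining inside a try/StopIteration with a single for-loop over the file carrying a skip counter and an after-marker flag, and replaces the inner for/break marker scan with a first-match generator expression.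
import Mathlib
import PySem

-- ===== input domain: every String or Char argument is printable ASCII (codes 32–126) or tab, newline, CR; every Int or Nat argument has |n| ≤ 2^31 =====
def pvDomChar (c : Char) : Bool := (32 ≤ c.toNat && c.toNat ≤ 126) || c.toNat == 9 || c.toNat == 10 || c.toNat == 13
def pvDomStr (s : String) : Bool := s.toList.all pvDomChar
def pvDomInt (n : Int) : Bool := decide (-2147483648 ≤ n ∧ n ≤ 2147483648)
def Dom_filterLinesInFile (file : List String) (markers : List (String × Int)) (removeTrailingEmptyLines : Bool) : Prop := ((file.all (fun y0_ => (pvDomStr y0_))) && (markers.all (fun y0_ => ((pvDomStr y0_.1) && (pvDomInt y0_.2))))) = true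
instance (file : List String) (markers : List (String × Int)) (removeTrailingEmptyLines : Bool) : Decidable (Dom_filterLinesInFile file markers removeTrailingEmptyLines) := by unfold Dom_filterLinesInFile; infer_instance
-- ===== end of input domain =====

-- B replaces A's manual next()/StopIteration draining with one loop carrying a
-- skip counter and an after-marker flag (objective: idiomatic/simpler).
-- Both are generators; equivalence is about the yielded sequence of lines.

-- ===== PORT A =====
-- A's inner 'for marker, nmbLines in markers.items(): if marker in line: … break'
def pvScanMarkers (items : List (String × Int)) (line : String) : Option Int :=
  match items with
  | [] => none
  | (marker, nmbLines) :: rest =>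
    if PySem.Str.isIn marker line then some nmbLines else pvScanMarkers rest line

-- A's 'while True: line = next(lines); while foundMarker …; for marker …' loop;
-- the 'for _ in range(nmbLines - 1): next(lines)' drain is List.drop (range(k) for k ≤ 0 is empty);
-- StopIteration anywhere simply ends the output.
def filterLinesInFileLoop (items : List (String × Int)) (removeTrailingEmptyLines : Bool) : List String → Bool → List String
  | [], _ => []
  | line :: rest, foundMarker =>
    if foundMarker && removeTrailingEmptyLines && line == "\n" then
      -- inner 'while …: line = next(lines)'
      filterLinesInFileLoop items removeTrailingEmptyLines rest foundMarker
    else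
      match pvScanMarkers items line with
      | some nmbLines =>
        filterLinesInFileLoop items removeTrailingEmptyLines (rest.drop (nmbLines - 1).toNat) true
      | none => line :: filterLinesInFileLoop items removeTrailingEmptyLines rest false
  termination_by l _ => l.length
  decreasing_by all_goals (simp [List.length_drop]; try omega)

def filterLinesInFile (file : List String) (markers : List (String × Int)) (removeTrailingEmptyLines : Bool) : List String :=
  filterLinesInFileLoop (PySem.Dict.ofList markers).items removeTrailingEmptyLines file false

-- ===== PORT B =====
-- B's single 'for line in file' loop with state (skip, afterMarker);
-- 'next((n for m, n in markers.items() if m in line), None)' is List.find?.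
def filterLinesInFileAltLoop (items : List (String × Int)) (removeTrailingEmptyLines : Bool) : List String → Int → Bool → List String
  | [], _, _ => []
  | line :: rest, skip, afterMarker =>
    if skip > 0 then
      filterLinesInFileAltLoop items removeTrailingEmptyLines rest (skip - 1) afterMarker
    else if afterMarker && removeTrailingEmptyLines && line == "\n" then
      filterLinesInFileAltLoop items removeTrailingEmptyLines rest skip afterMarker
    else
      match (items.find? (fun p => PySem.Str.isIn p.1 line)).map (·.2) with
      | none => line :: filterLinesInFileAltLoop items removeTrailingEmptyLines rest 0 false
      | some nmbLines =>
        filterLinesInFileAltLoop items removeTrailingEmptyLines rest (nmbLines - 1) true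

def filterLinesInFile_alt (file : List String) (markers : List (String × Int)) (removeTrailingEmptyLines : Bool) : List String :=
  filterLinesInFileAltLoop (PySem.Dict.ofList markers).items removeTrailingEmptyLines file 0 false

-- ===== PRECONDITION & SPEC =====
def Spec_filterLinesInFile (file : List String) (markers : List (String × Int)) (removeTrailingEmptyLines : Bool) (out : List String) : Prop := out = filterLinesInFile_alt file markers removeTrailingEmptyLines
instance (file : List String) (markers : List (String × Int)) (removeTrailingEmptyLines : Bool) (out : List String) : Decidable (Spec_filterLinesInFile file markers removeTrailingEmptyLines out) := by unfold Spec_filterLinesInFile; infer_instance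

-- ===== CLAIM (what is proved, stated in full; the proofs are below) =====
def Claim_equal_filterLinesInFile : Prop := ∀ (file : List String) (markers : List (String × Int)) (removeTrailingEmptyLines : Bool), Dom_filterLinesInFile file markers removeTrailingEmptyLines → Spec_filterLinesInFile file markers removeTrailingEmptyLines (filterLinesInFile file markers removeTrailingEmptyLines)

-- ===== LEMMAS AND PROOFS =====

-- A's marker scan is the first-match lookup B uses.
theorem pvScanMarkers_eq_find? (items : List (String × Int)) (line : String) :
    pvScanMarkers items line = (items.find? (fun p => PySem.Str.isIn p.1 line)).map (·.2) := by
  induction items with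
  | nil => rfl
  | cons p rest ih =>
    obtain ⟨m, n⟩ := p
    simp [pvScanMarkers, List.find?]
    split_ifs with h
    · simp [h]
    · simpa [h] using ih

-- while skip > 0, B merely drops lines
theorem altLoop_skip (items : List (String × Int)) (r : Bool) (k : Nat) :
    ∀ (l : List String) (am : Bool),
      filterLinesInFileAltLoop items r l (k : Int) am =
        filterLinesInFileAltLoop items r (l.drop k) 0 am := by
  induction k with
  | zero => intro l am; simp
  | succ k ih =>
    intro l am
    cases l with
    | nil => simp [filterLinesInFileAltLoop]
    | cons line rest =>
      have hpos : ((k + 1 : Nat) : Int) > 0 := by exact_mod_cast Nat.succ_pos k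
      simp only [filterLinesInFileAltLoop, if_pos hpos]
      have : ((k + 1 : Nat) : Int) - 1 = (k : Int) := by push_cast; ring
      rw [this, ih]
      simp

-- a non-positive skip behaves like skip = 0
theorem altLoop_nonpos (items : List (String × Int)) (r : Bool) :
    ∀ (l : List String) (s : Int), s ≤ 0 → ∀ (am : Bool),
      filterLinesInFileAltLoop items r l s am = filterLinesInFileAltLoop items r l 0 am := by
  intro l
  induction l with
  | nil => intro s _ am; rfl
  | cons line rest ih =>
    intro s hs am
    have h1 : ¬ (s > 0) := by omega
    have h2 : ¬ ((0 : Int) > 0) := by omega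
    simp only [filterLinesInFileAltLoop, if_neg h1, if_neg h2]
    split_ifs with h
    · exact ih s hs am
    · rfl

theorem loop_eq (items : List (String × Int)) (r : Bool) :
    ∀ (l : List String) (fm : Bool),
      filterLinesInFileLoop items r l fm = filterLinesInFileAltLoop items r l 0 fm
  | [], fm => by simp [filterLinesInFileLoop, filterLinesInFileAltLoop]
  | line :: rest, fm => by
    have h2 : ¬ ((0 : Int) > 0) := by omega
    simp only [filterLinesInFileLoop, filterLinesInFileAltLoop, if_neg h2]
    split_ifs with h
    · exact loop_eq items r rest fm
    · rw [pvScanMarkers_eq_find?]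
      cases hfind : (List.find? (fun p => PySem.Str.isIn p.1 line) items).map (·.2) with
      | none => dsimp only; rw [loop_eq items r rest false]
      | some n =>
        dsimp only
        by_cases hn : n ≤ 1
        · have hdrop : (n - 1).toNat = 0 := by omega
          rw [hdrop, List.drop_zero, loop_eq items r rest true,
              altLoop_nonpos items r rest (n - 1) (by omega) true]
        · have hcast : ((n - 1).toNat : Int) = n - 1 := by omega
          rw [loop_eq items r (rest.drop (n - 1).toNat) true, ← altLoop_skip items r (n - 1).toNat rest true, hcast]
  termination_by l _ => l.length
  decreasing_by all_goals (simp [List.length_drop]; try omega)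

-- ===== VERDICT (by name: the statement is the Claim_ definition above) =====
theorem filterLinesInFile_spec : Claim_equal_filterLinesInFile := by
  intro file markers r _
  unfold Spec_filterLinesInFile filterLinesInFile filterLinesInFile_alt
  exact loop_eq _ r file false
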